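-- pv_equiv track=rewrite | github.com/erikwjacobson/apii | apii.py | buildConsecutiveArray
-- ===== SOURCE A (Python) =====
-- def buildConsecutiveArray(column):
--     columnAr = list(column)
--     ar = []
--     # The last index where an array was created
--     startingIndex = 0
--     for i in range(len(columnAr)):
--         # If we hit a breaking point
--         if(columnAr[i] == 0):
--             # Create an array starting at the value where the last
--             temp = columnAr[startingIndex:i]
--             startingIndex = i + 1
--             ar.append(temp)
--         # Else, move on to the next value
--         else:
--             if(i == len(columnAr) - 1):
--                 temp = columnAr[startingIndex:i + 1]
--                 ar.append(temp)
--                 break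
--             else:
--                 continue
--
--     # Remove empty arrays
--     final = list(filter(None, ar))
--
--     return final
-- ===== SOURCE B (Python) =====
-- def buildConsecutiveArray(column):
--     runs = []
--     cur = []
--     for x in column:
--         if x == 0:
--             if cur:
--                 runs.append(cur)
--                 cur = []
--         else:
--             cur.append(x)
--     if cur:
--         runs.append(cur)
--     return runs
-- ===== Notes on version B (the rewrite author's own statement) =====
-- stated objective: simpler
-- what changed: Replaced A's index loop with startingIndex bookkeeping, slicing, a special last-index break branch and a trailing filter(None, ...) by a single accumulator pass that appends non-zero elements to a current run and flushes it (only if non-empty) at each zero and at the end. (constant-factor gain: no repeated slicing copies or post-filter pass)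
import Mathlib
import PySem

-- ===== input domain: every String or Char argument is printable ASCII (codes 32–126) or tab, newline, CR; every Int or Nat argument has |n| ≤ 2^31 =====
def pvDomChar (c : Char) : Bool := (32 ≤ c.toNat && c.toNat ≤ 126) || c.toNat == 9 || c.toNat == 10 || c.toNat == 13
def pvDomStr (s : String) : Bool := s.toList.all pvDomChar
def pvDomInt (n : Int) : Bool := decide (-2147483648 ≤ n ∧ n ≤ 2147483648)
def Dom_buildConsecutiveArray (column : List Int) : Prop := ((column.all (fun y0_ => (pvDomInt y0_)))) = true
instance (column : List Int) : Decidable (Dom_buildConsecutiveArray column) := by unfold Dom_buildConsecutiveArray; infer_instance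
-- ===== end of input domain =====

-- B replaces A's index/slice bookkeeping and trailing filter(None, ...) by a single
-- accumulator pass that flushes the current non-empty run at each zero (objective: simpler).

-- ===== PORT A =====
-- the `for i in range(len(columnAr))` loop of A: recursion over the index list,
-- state = (startingIndex, ar); the `break` branch returns immediately.
def aLoop (l : List Int) : List Nat → Nat → List (List Int) → List (List Int)
  | [], _, ar => ar
  | i :: rest, si, ar =>
    -- columnAr[i]: i ∈ range(len), so pyGet? is `some`; getD 0 only discharges the Option
    if (PySem.List.pyGet? l (i : Int)).getD 0 = 0 then
      aLoop l rest (i + 1) (ar ++ [PySem.List.slice l (some (si : Int)) (some (i : Int))])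
    else
      if i = l.length - 1 then
        ar ++ [PySem.List.slice l (some (si : Int)) (some ((i : Int) + 1))]
      else
        aLoop l rest si ar

def buildConsecutiveArray (column : List Int) : List (List Int) :=
  -- final = list(filter(None, ar))
  (aLoop column (List.range column.length) 0 []).filter (fun g => !g.isEmpty)

-- ===== PORT B =====
-- Source B's single pass: state = (runs, cur); flush cur at a zero if non-empty.
def bLoop : List Int → List (List Int) → List Int → List (List Int)
  | [], runs, cur => if cur.isEmpty then runs else runs ++ [cur]
  | x :: xs, runs, cur =>
    if x = 0 then
      if cur.isEmpty then bLoop xs runs [] else bLoop xs (runs ++ [cur]) []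
    else
      bLoop xs runs (cur ++ [x])

def buildConsecutiveArray_alt (column : List Int) : List (List Int) :=
  bLoop column [] []

-- ===== PRECONDITION & SPEC =====
def Spec_buildConsecutiveArray (column : List Int) (out : List (List Int)) : Prop := out = buildConsecutiveArray_alt column
instance (column : List Int) (out : List (List Int)) : Decidable (Spec_buildConsecutiveArray column out) := by unfold Spec_buildConsecutiveArray; infer_instance

-- ===== CLAIM (what is proved, stated in full; the proofs are below) =====
def Claim_equal_buildConsecutiveArray : Prop := ∀ (column : List Int), Dom_buildConsecutiveArray column → Spec_buildConsecutiveArray column (buildConsecutiveArray column)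

-- ===== LEMMAS AND PROOFS =====

-- the pending segment grows by the element at position k
lemma take_succ_seg (l : List Int) (si k : Nat) (x : Int) (rest : List Int)
    (hsk : si ≤ k) (hd : l.drop k = x :: rest) :
    (l.drop si).take (k + 1 - si) = (l.drop si).take (k - si) ++ [x] := by
  have h1 : (l.drop si).drop (k - si) = l.drop k := by
    rw [List.drop_drop]; congr 1; omega
  have h2 : (l.drop si)[k - si]? = some x := by
    rw [← List.head?_drop, h1, hd]; rfl
  have h3 : k + 1 - si = (k - si) + 1 := by omega
  rw [h3, List.take_add_one, h2]; rfl

-- main invariant: A's loop from index k (pending segment l[si:k], accumulator ar),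
-- followed by filter(None, ·), equals B's loop on the remaining suffix
lemma main_inv (suf : List Int) : ∀ (l : List Int) (si k : Nat) (ar : List (List Int)),
    l.drop k = suf → si ≤ k → (suf = [] → si = k) →
    (aLoop l (List.range' k suf.length) si ar).filter (fun g => !g.isEmpty)
      = bLoop suf (ar.filter (fun g => !g.isEmpty)) ((l.drop si).take (k - si)) := by
  induction suf with
  | nil =>
    intro l si k ar hd hsk hnil
    have : si = k := hnil rfl
    subst this
    simp [aLoop, bLoop]
  | cons x rest ih =>
    intro l si k ar hd hsk _
    have hget : l[k]? = some x := by rw [← List.head?_drop, hd]; rfl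
    have hdrop1 : l.drop (k + 1) = rest := by
      have : l.drop (k + 1) = (l.drop k).drop 1 := by rw [List.drop_drop]
      rw [this, hd]; rfl
    have hseg := take_succ_seg l si k x rest hsk hd
    simp only [List.length_cons, List.range'_succ, aLoop, PySem.List.pyGet?_natCast, hget,
      Option.getD_some]
    by_cases hx : x = 0
    · -- zero: A appends the (possibly empty) slice, B flushes cur if non-empty
      simp only [hx, reduceIte]
      rw [PySem.List.slice_natCast]
      rw [ih l (k + 1) (k + 1) (ar ++ [(l.drop si).take (k - si)]) hdrop1 le_rfl (fun _ => rfl)]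
      simp only [Nat.sub_self, List.take_zero, List.filter_append, bLoop]
      by_cases hc : ((l.drop si).take (k - si)).isEmpty
      · simp [hc]
      · simp [hc, List.filter]
    · -- non-zero element
      simp only [if_neg hx]
      cases rest with
      | nil =>
        -- last index: the break branch
        have hlen : l.length = k + 1 := by
          have h1 : l.length - k = 1 := by rw [← List.length_drop, hd]; rfl
          have h2 : k < l.length := (List.getElem?_eq_some_iff.mp hget).1
          omega
        have hk : k = l.length - 1 := by omega
        simp only [if_pos hk]
        have : ((k : Int) + 1) = ((k + 1 : Nat) : Int) := by push_cast; ring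
        rw [this, PySem.List.slice_natCast, hseg]
        simp only [List.filter_append, bLoop, if_neg hx]
        simp
      | cons y rest' =>
        -- not the last index: continue with the same startingIndex
        have hk : ¬ (k = l.length - 1) := by
          have h1 : k + 1 < l.length := (List.getElem?_eq_some_iff.mp (show l[k+1]? = some y by
              rw [← List.head?_drop, hdrop1]; rfl)).1
          omega
        simp only [if_neg hk]
        rw [ih l si (k + 1) ar hdrop1 (by omega) (by simp)]
        rw [show k + 1 - si = (k - si) + 1 by omega] at hseg ⊢
        rw [hseg]
        simp [bLoop, hx]

-- ===== VERDICT (by name: the statement is the Claim_ definition above) =====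
theorem buildConsecutiveArray_spec : Claim_equal_buildConsecutiveArray := by
  intro column _
  show buildConsecutiveArray column = buildConsecutiveArray_alt column
  unfold buildConsecutiveArray buildConsecutiveArray_alt
  rw [List.range_eq_range']
  have h := main_inv column column 0 0 [] (by simp) le_rfl (fun _ => rfl)
  simpa using h
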